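-- pv_equiv track=rewrite | github.com/kmo12/general | labs/module-6_practice-3.py | text_cleaning
-- ===== SOURCE A (Python) =====
-- import string
--
-- def text_cleaning(text):
--     """
--     Функция получает текст, выводит текст без знаков препинания (оставляя дефис) и без цифр
--     :param text:
--     :return text:
--     """
--     text = str(text)
--
--     # Текст в нижний регистр
--     text = text.lower()
--
--     # Убираем всю пунктуацию и дополнительно знак тирэ (дефис оставляем)
--     for punc_char in string.punctuation:
--         if punc_char == "-":
--             continue
--         text = text.replace(punc_char, "")
--     text = text.replace("—", "")
--
--     # Убираем все цифры
--     # Модуль translate берёт таблицу и меняет все символы в тексте, в соответсвии с ней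
--     # Модуль maketrans создаёт таблицу (третьим параметром устанавливается str, каждый символ которого будет переведён)
--     # с помощью translate в None (=> удалён)
--     text = text.translate(text.maketrans("", "", string.digits))
--
--     # Специфика вывода строк через readlines
--     text = text.replace("\n", "")
--
--     # Убираем двойные пробелы для простоты работы далее
--     text = text.replace("  ", " ")
--
--     return text
-- ===== SOURCE B (Python) =====
-- import string
--
-- def text_cleaning(text):
--     text = str(text).lower()
--     remove = set(string.punctuation) - {'-'}
--     remove |= {'—', '\n'}
--     remove |= set(string.digits)
--     text = ''.join(c for c in text if c not in remove)
--     return text.replace('  ', ' ')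
-- ===== Notes on version B (the rewrite author's own statement) =====
-- stated objective: simpler
-- what changed: One removal set and a single filtering pass over the characters replaces A's 34 successive per-character replace passes plus a translate pass; only the final double-space collapse stays a single replace.
import Mathlib
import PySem

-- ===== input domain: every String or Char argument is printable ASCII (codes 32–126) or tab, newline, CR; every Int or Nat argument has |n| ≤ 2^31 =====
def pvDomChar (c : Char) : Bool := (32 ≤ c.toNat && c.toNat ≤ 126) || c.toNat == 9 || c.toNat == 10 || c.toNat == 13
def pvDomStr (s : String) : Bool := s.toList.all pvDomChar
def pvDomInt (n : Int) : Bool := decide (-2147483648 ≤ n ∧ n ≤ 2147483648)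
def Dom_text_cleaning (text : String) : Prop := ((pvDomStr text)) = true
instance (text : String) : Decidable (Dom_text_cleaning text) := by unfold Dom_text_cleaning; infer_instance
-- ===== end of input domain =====

-- B replaces A's 34 successive per-character replace passes (plus a translate pass) by one
-- removal set and a single filtering pass; the final double-space collapse stays one replace.


-- ===== PORT A =====
-- string.punctuation
def pvPunct : List Char :=
  ['!','"','#','$','%','&','\'','(',')','*','+',',','-','.','/',':',';','<','=','>','?','@','[','\\',']','^','_','`','{','|','}','~']
-- string.digits
def pvDigits : List Char := ['0','1','2','3','4','5','6','7','8','9']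

def text_cleaning (text : String) : String :=
  let t0 := PySem.Str.lower text
  -- for punc_char in string.punctuation: continue on '-', else replace with ""
  let t1 := pvPunct.foldl (fun t pc => if pc == '-' then t else PySem.Str.replace t (String.ofList [pc]) "") t0
  let t2 := PySem.Str.replace t1 "—" ""
  -- translate with a delete-only table for string.digits: exact = drop every digit character
  let t3 := String.ofList (t2.toList.filter (fun c => !(pvDigits.contains c)))
  let t4 := PySem.Str.replace t3 "\n" ""
  PySem.Str.replace t4 "  " " "

-- ===== PORT B =====
-- remove = set(string.punctuation) - {'-'}; remove |= {'—','\n'}; remove |= set(string.digits)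
def pvRemove : List Char :=
  PySem.Set.ofList ((pvPunct.filter (fun c => c != '-')) ++ ['—','\n'] ++ pvDigits)

def text_cleaning_alt (text : String) : String :=
  let t := PySem.Str.lower text
  let t := String.ofList (t.toList.filter (fun c => !(pvRemove.contains c)))
  PySem.Str.replace t "  " " "

-- ===== PRECONDITION & SPEC =====
def Spec_text_cleaning (text : String) (out : String) : Prop := out = text_cleaning_alt text
instance (text : String) (out : String) : Decidable (Spec_text_cleaning text out) := by unfold Spec_text_cleaning; infer_instance

-- ===== CLAIM (what is proved, stated in full; the proofs are below) =====
def Claim_equal_text_cleaning : Prop := ∀ (text : String), Dom_text_cleaning text → Spec_text_cleaning text (text_cleaning text)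

-- ===== LEMMAS AND PROOFS =====

-- replace.go with a single-character pattern and empty replacement is filter
theorem pvGoSingle (c : Char) : ∀ (l acc : List Char),
    PySem.Chars.replace.go [c] [] l.length l acc = acc.reverse ++ l.filter (fun x => x != c) := by
  intro l
  induction l with
  | nil => intro acc; simp [PySem.Chars.replace.go]
  | cons h t ih =>
    intro acc
    by_cases hc : h = c
    · subst hc
      simpa [PySem.Chars.replace.go, List.isPrefixOf] using ih acc
    · simpa [PySem.Chars.replace.go, List.isPrefixOf, hc, Ne.symm hc] using ih (h :: acc)

theorem pvReplaceSingle (s : List Char) (c : Char) :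
    PySem.Chars.replace s [c] [] = s.filter (fun x => x != c) := by
  simpa using pvGoSingle c s []

-- the punctuation loop is one filter
theorem pvFoldlReplace (ps : List Char) : ∀ (t : List Char),
    ps.foldl (fun t pc => if pc == '-' then t else t.filter (fun x => x != pc)) t
      = t.filter (fun x => ps.all (fun pc => pc == '-' || x != pc)) := by
  induction ps with
  | nil => intro t; simp
  | cons p ps ih =>
    intro t
    by_cases hp : p = '-'
    · subst hp
      rw [List.foldl_cons, if_pos (by simp : (('-' : Char) == '-') = true), ih]
      refine List.filter_congr ?_
      intro x _
      simp
    · rw [List.foldl_cons, if_neg (by simp [hp]), ih, List.filter_filter]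
      refine List.filter_congr ?_
      intro x _
      simp [beq_eq_false_iff_ne.mpr hp, Bool.and_comm]

-- the punctuation loop on strings, expressed over the character list
theorem pvFoldStr (ps : List Char) : ∀ (s : String),
    ps.foldl (fun t pc => if pc == '-' then t else PySem.Str.replace t (String.ofList [pc]) "") s
      = String.ofList (ps.foldl (fun t pc => if pc == '-' then t else PySem.Chars.replace t [pc] []) s.toList) := by
  induction ps with
  | nil => intro s; exact String.ofList_toList.symm
  | cons p ps ih =>
    intro s
    by_cases hp : p = '-'
    · simp only [List.foldl_cons, hp, beq_self_eq_true, if_true]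
      exact ih s
    · simp only [List.foldl_cons, if_neg (by simp [hp] : ¬ ((p == '-') = true))]
      rw [ih]
      congr 1
      simp

set_option maxRecDepth 8192 in
theorem pvMain (text : String) : text_cleaning text = text_cleaning_alt text := by
  unfold text_cleaning text_cleaning_alt
  refine congrArg (fun s => PySem.Str.replace s "  " " ") ?_
  apply String.toList_inj.mp
  rw [pvFoldStr]
  simp only [PySem.Str.toList_replace, String.toList_ofList]
  rw [show ("—" : String).toList = ['—'] from rfl, show ("\n" : String).toList = ['\n'] from rfl,
      show ("" : String).toList = [] from rfl]
  rw [show (fun t pc => if pc == '-' then t else PySem.Chars.replace t [pc] [])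
        = (fun t pc => if pc == '-' then t else t.filter (fun x => x != pc)) from by
      funext t pc; by_cases h : pc = '-' <;> simp [h, pvReplaceSingle]]
  rw [pvFoldlReplace, pvReplaceSingle, pvReplaceSingle]
  simp only [List.filter_filter]
  refine List.filter_congr ?_
  intro x _
  have hR : pvRemove = ['!', '"', '#', '$', '%', '&', '\'', '(', ')', '*', '+', ',', '.', '/', ':', ';', '<', '=', '>', '?', '@', '[', '\\', ']', '^', '_', '`', '{', '|', '}', '~', '—', '\n', '0', '1', '2', '3', '4', '5', '6', '7', '8', '9'] := by decide
  rw [hR]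
  by_cases hx : x ∈ (['!', '"', '#', '$', '%', '&', '\'', '(', ')', '*', '+', ',', '.', '/', ':', ';', '<', '=', '>', '?', '@', '[', '\\', ']', '^', '_', '`', '{', '|', '}', '~', '—', '\n', '0', '1', '2', '3', '4', '5', '6', '7', '8', '9'] : List Char)
  · fin_cases hx <;> decide
  · have hc : (['!', '"', '#', '$', '%', '&', '\'', '(', ')', '*', '+', ',', '.', '/', ':', ';', '<', '=', '>', '?', '@', '[', '\\', ']', '^', '_', '`', '{', '|', '}', '~', '—', '\n', '0', '1', '2', '3', '4', '5', '6', '7', '8', '9'] : List Char).contains x = false := by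
      simpa using hx
    rw [hc]
    simp only [List.mem_cons, not_or] at hx
    obtain ⟨h1', h2', h3', h4', h5', h6', h7', h8', h9', h10', h11', h12', h13', h14', h15', h16', h17', h18', h19', h20', h21', h22', h23', h24', h25', h26', h27', h28', h29', h30', h31', h32', h33', h34', h35', h36', h37', h38', h39', h40', h41', h42', h43'⟩ := hx
    simp_all [pvPunct, pvDigits]

-- ===== VERDICT (by name: the statement is the Claim_ definition above) =====
theorem text_cleaning_spec : Claim_equal_text_cleaning := by
  intro text _
  exact pvMain text
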